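-- pv_equiv track=rewrite | github.com/splatpope/KNIFER | architectures/common.py | doubling_arch_builder
-- ===== SOURCE A (Python) =====
-- def disc_features(
--         n_layers: int,
--         base_features: int,
--         features_list: "list[int]" = []
--     ) -> "list[int]":
--     """Derive list of features for generator tail layers.
--
--     Args:
--         n_layers (int): Amount of tail layers.
--         base_features (int): Base amount of features.
--             (i.e. in_c of the first mid layer)
--         feature_list (list[int], optional): List of in_c for the tail layers.
--             If missing, every layer will have double the preceding layer's features.
--             Defaults to None.
--     """
--
--     if not features_list:
--         features_list = [base_features]
--     assert features_list[0] == base_features, "Bogus features list."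
--     adds = [features_list[-1] * 2**(i+1) for i in range(n_layers - len(features_list))]
--     return features_list + adds
--
-- def doubling_arch_builder(img_size: int, base_features: int):
--     """Builds required parameters for an architectures that does x2 upscales/downscales
--     and doubles their layer feature, based on an image size and base number of features.
--
--     Args:
--         img_size (int): Image size for the models. (i.e. dataset and generator output)
--         base_features (int): Base amount of conv layer features.
--
--     Returns:
--         Parameters (Tuple[int, int, int]): Upscale/Downscale factor list and features.
--     """
--     scalings = []
--     size = 4
--     while size < img_size:
--         scalings.append(2)
--         size *= 2
--     features_d = disc_features(len(scalings), base_features)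
--     features_g = features_d[::-1]
--     return scalings, features_d, features_g
-- ===== SOURCE B (Python) =====
-- def doubling_arch_builder(img_size: int, base_features: int):
--     """Closed-form version: number of x2 scalings computed via bit_length
--     instead of the doubling while-loop."""
--     k = (img_size - 1).bit_length() - 2 if img_size > 4 else 0
--     scalings = [2] * k
--     features_d = [base_features * 2 ** i for i in range(max(k, 1))]
--     return scalings, features_d, features_d[::-1]
-- ===== Notes on version B (the rewrite author's own statement) =====
-- stated objective: simpler
-- what changed: Replaced the while-loop that doubles size from 4 with a closed-form bit_length computation of the number of scalings, and built the feature list with a direct power-of-two comprehension instead of the disc_features helper with its default-list/assert machinery.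
import Mathlib
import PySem

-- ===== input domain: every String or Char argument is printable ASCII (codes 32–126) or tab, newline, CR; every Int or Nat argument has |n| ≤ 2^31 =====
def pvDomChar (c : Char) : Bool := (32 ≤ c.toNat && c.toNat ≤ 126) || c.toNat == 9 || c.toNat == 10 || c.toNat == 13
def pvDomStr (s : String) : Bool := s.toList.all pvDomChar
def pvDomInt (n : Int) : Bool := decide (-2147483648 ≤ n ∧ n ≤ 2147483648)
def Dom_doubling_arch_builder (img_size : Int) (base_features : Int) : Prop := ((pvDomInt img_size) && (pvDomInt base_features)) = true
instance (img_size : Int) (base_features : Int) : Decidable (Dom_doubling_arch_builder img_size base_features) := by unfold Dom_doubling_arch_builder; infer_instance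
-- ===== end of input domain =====

-- B replaces A's doubling while-loop by a closed-form bit-length count of the scalings (simpler).

-- ===== PORT A =====
-- helper: Python's disc_features(n_layers, base_features, features_list=[]).
-- The assert `features_list[0] == base_features` always holds at the one call site
-- (features_list = [] forces fl = [base_features]); it is a no-op there and not modeled.
-- features_list[-1] via pyGet?; fl is nonempty on every call here so the .getD 0 default is never used.
def disc_features (n_layers : Int) (base_features : Int) (features_list : List Int) : List Int :=
  let fl := if features_list = [] then [base_features] else features_list
  let last := (PySem.List.pyGet? fl (-1)).getD 0
  -- i ranges over range(n_layers - len(fl)); i ≥ 0 there, so 2**(i+1) = 2^(i+1).toNat exactly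
  let adds := (PySem.List.pyRange 0 (n_layers - (fl.length : Int)) 1).map (fun i => last * 2 ^ (i + 1).toNat)
  fl ++ adds

-- the while loop `while size < img_size: scalings.append(2); size *= 2`;
-- the 0 < size hypothesis only justifies termination (size starts at 4 and doubles)
def pyLoop (img_size : Int) (size : Int) (hs : 0 < size) (acc : List Int) : List Int :=
  if h : size < img_size then pyLoop img_size (size * 2) (by omega) (acc ++ [2]) else acc
termination_by (img_size - size).toNat
decreasing_by omega

def doubling_arch_builder (img_size : Int) (base_features : Int) : List Int × List Int × List Int :=
  let scalings := pyLoop img_size 4 (by norm_num) []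
  let features_d := disc_features (scalings.length : Int) base_features []
  let features_g := features_d.reverse   -- features_d[::-1]
  (scalings, features_d, features_g)

-- ===== PORT B =====
-- k = (img_size-1).bit_length() - 2 if img_size > 4 else 0;
-- for m ≥ 1, Python m.bit_length() = Nat.log2 m + 1, so k = log2(img_size-1) - 1
def doubling_arch_builder_alt (img_size : Int) (base_features : Int) : List Int × List Int × List Int :=
  let k : Nat := if img_size ≤ 4 then 0 else Nat.log2 (img_size - 1).natAbs - 1
  let scalings : List Int := List.replicate k 2
  let features_d := (List.range (max k 1)).map (fun i => base_features * 2 ^ i)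
  (scalings, features_d, features_d.reverse)

-- ===== PRECONDITION & SPEC =====
def Spec_doubling_arch_builder (img_size : Int) (base_features : Int) (out : List Int × List Int × List Int) : Prop := out = doubling_arch_builder_alt img_size base_features
instance (img_size : Int) (base_features : Int) (out : List Int × List Int × List Int) : Decidable (Spec_doubling_arch_builder img_size base_features out) := by unfold Spec_doubling_arch_builder; infer_instance

-- ===== CLAIM (what is proved, stated in full; the proofs are below) =====
def Claim_equal_doubling_arch_builder : Prop := ∀ (img_size : Int) (base_features : Int), Dom_doubling_arch_builder img_size base_features → Spec_doubling_arch_builder img_size base_features (doubling_arch_builder img_size base_features)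

-- ===== LEMMAS AND PROOFS =====

-- the loop appends exactly k twos, where k is characterised by s·2^k ≥ N and (k = 0 ∨ s·2^(k-1) < N)
theorem pyLoop_eq_replicate (N : Int) : ∀ (k : Nat) (s : Int) (hs : 0 < s) (acc : List Int),
    N ≤ s * 2 ^ k → (k = 0 ∨ s * 2 ^ (k - 1) < N) →
    pyLoop N s hs acc = acc ++ List.replicate k 2 := by
  intro k
  induction k with
  | zero =>
    intro s hs acc h1 _
    rw [pyLoop]
    simp only [pow_zero, mul_one] at h1
    rw [dif_neg (by omega)]
    simp
  | succ k ih =>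
    intro s hs acc h1 h2
    have hk : s * 2 ^ k < N := by
      have := h2.resolve_left (Nat.succ_ne_zero k)
      simpa using this
    have e1 : s * 2 * 2 ^ k = s * 2 ^ (k + 1) := by rw [pow_succ]; ring
    have hlt : s < N := by
      have hle : s * 1 ≤ s * 2 ^ k :=
        mul_le_mul_of_nonneg_left (one_le_pow₀ (by norm_num)) (le_of_lt hs)
      omega
    rw [pyLoop, dif_pos hlt]
    rw [ih (s * 2) (by omega) (acc ++ [2]) (by omega)
        (by
          rcases Nat.eq_zero_or_pos k with h | h
          · exact Or.inl h
          · right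
            have e2 : s * 2 * 2 ^ (k - 1) = s * 2 ^ k := by
              have h2k : (2 : Int) ^ k = 2 ^ (k - 1) * 2 := by
                rw [← pow_succ]
                congr 1
                omega
              rw [h2k]
              ring
            omega)]
    simp [List.replicate_succ]

theorem pyLoop_4 (N : Int) (k : Nat)
    (h1 : N ≤ 4 * 2 ^ k) (h2 : k = 0 ∨ 4 * 2 ^ (k - 1) < N) :
    pyLoop N 4 (by norm_num) [] = List.replicate k 2 := by
  simpa using pyLoop_eq_replicate N k 4 (by norm_num) [] h1 h2

-- the closed-form count of port B satisfies the loop characterisation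
theorem altK_spec (N : Int) :
    N ≤ 4 * 2 ^ (if N ≤ 4 then 0 else Nat.log2 (N - 1).natAbs - 1) ∧
    ((if N ≤ 4 then 0 else Nat.log2 (N - 1).natAbs - 1) = 0 ∨
      4 * 2 ^ ((if N ≤ 4 then (0 : Nat) else Nat.log2 (N - 1).natAbs - 1) - 1) < N) := by
  by_cases h : N ≤ 4
  · simp only [if_pos h]
    norm_num
    omega
  · simp only [if_neg h]
    set m : Nat := (N - 1).natAbs with hm
    have hmN : (m : Int) = N - 1 := by omega
    have hm4 : 4 ≤ m := by omega
    set l := Nat.log2 m with hl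
    have hlow : 2 ^ l ≤ m := Nat.log2_self_le (by omega)
    have hhigh : m < 2 ^ (l + 1) := Nat.lt_log2_self
    have hl2 : 2 ≤ l := by
      by_contra hc
      have : 2 ^ (l + 1) ≤ 2 ^ 2 := Nat.pow_le_pow_right (by norm_num) (by omega)
      omega
    constructor
    · -- N ≤ 4·2^(l-1) = 2^(l+1)
      have h4 : (4 : Int) * 2 ^ (l - 1) = 2 ^ (l + 1) := by
        rw [show (4 : Int) = 2 ^ 2 by norm_num, ← pow_add]
        congr 1
        omega
      rw [h4]
      have : (m : Int) < (2 : Int) ^ (l + 1) := by exact_mod_cast hhigh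
      omega
    · right
      -- 4·2^(l-2) = 2^l ≤ m < N
      have h4 : (4 : Int) * 2 ^ (l - 1 - 1) = 2 ^ l := by
        rw [show (4 : Int) = 2 ^ 2 by norm_num, ← pow_add]
        congr 1
        omega
      rw [h4]
      have : (2 : Int) ^ l ≤ (m : Int) := by exact_mod_cast hlow
      omega

-- A's features list disc_features k bf [] equals B's comprehension
theorem features_eq (k : Nat) (bf : Int) :
    disc_features (k : Int) bf [] = (List.range (max k 1)).map (fun i => bf * 2 ^ i) := by
  unfold disc_features
  rw [if_pos rfl]
  have hget : (PySem.List.pyGet? [bf] (-1)).getD 0 = bf := by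
    simp [PySem.List.pyGet?, PySem.List.pyIdx?]
  simp only [hget, List.length_singleton, Nat.cast_one]
  rcases Nat.eq_zero_or_pos k with h | h
  · subst h
    rw [PySem.List.pyRange_one_eq_nil (by norm_num)]
    simp [List.range_succ]
  · rw [show ((k : Int) - 1) = ((k - 1 : Nat) : Int) by omega, PySem.List.pyRange_zero_nat,
        show max k 1 = (k - 1) + 1 by omega, List.range_succ_eq_map]
    simp only [List.map_cons, List.map_map, pow_zero, mul_one, List.singleton_append,
      List.cons.injEq, true_and]
    apply List.map_congr_left
    intro j _
    have ht : ((j : Int) + 1).toNat = j + 1 := by omega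
    simp [Function.comp, ht]

-- ===== VERDICT (by name: the statement is the Claim_ definition above) =====
theorem doubling_arch_builder_spec : Claim_equal_doubling_arch_builder := by
  intro N bf _
  obtain ⟨h1, h2⟩ := altK_spec N
  simp only [Spec_doubling_arch_builder, doubling_arch_builder, doubling_arch_builder_alt]
  rw [pyLoop_4 N _ h1 h2, List.length_replicate, features_eq]
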